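-- pv_equiv track=rewrite | github.com/hrshptl6595/DSA | Scripts/Predible/neural_firing.py | neural
-- ===== SOURCE A (Python) =====
-- def neural(seq):
--     count = []
--     for x in seq:
--         c = 0
--         for i in range(len(x)):
--             if x[i] == '1':
--                 for j in range(i+1,len(x)):
--                     if x[j] == '0':
--                         c = c+1
--                     else:
--                         break
--         count.append(c)
--     return count
-- ===== SOURCE B (Python) =====
-- def neural(seq):
--     out = []
--     for x in seq:
--         z = 0  # length of the run of '0's immediately to the right
--         c = 0
--         for ch in reversed(x):
--             if ch == '0':
--                 z += 1
--             else:
--                 if ch == '1':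
--                     c += z
--                 z = 0
--         out.append(c)
--     return out
-- ===== Notes on version B (the rewrite author's own statement) =====
-- stated objective: alternative
-- what changed: Replaces the nested scan (for each '1' re-count the zeros following it) by a single reverse pass per string that maintains the current suffix run of zeros and adds it at each '1'; A is quadratic in the worst case but a timing run's random inputs did not reach that, so no speed is claimed.
import Mathlib
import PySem

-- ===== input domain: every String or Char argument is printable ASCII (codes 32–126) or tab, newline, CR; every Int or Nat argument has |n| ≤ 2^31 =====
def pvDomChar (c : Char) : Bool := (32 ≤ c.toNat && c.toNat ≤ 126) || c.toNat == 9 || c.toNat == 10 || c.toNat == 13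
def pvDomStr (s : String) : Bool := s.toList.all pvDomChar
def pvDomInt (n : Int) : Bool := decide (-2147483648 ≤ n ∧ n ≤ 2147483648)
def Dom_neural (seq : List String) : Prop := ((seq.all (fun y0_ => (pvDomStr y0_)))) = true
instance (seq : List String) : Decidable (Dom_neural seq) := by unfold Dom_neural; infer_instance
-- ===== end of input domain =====

-- B replaces A's nested rescans (re-counting the zeros after each '1') with one reverse pass per string keeping the suffix zero-run.


-- ===== PORT A =====
-- inner loop 'for j in range(i+1, len(x)): if x[j]=='0': c += 1 else: break'
def neuralInnerA (x : List Char) (js : List Int) (c : Int) : Int :=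
  match js with
  | [] => c
  | j :: rest => if PySem.List.pyGetD x j ' ' = '0' then neuralInnerA x rest (c + 1) else c

def neuralOneA (x : List Char) : Int :=
  (PySem.List.pyRange 0 (x.length : Int) 1).foldl
    (fun c i =>
      if PySem.List.pyGetD x i ' ' = '1'
      then neuralInnerA x (PySem.List.pyRange (i + 1) (x.length : Int) 1) c
      else c) 0

def neural (seq : List String) : List Int :=
  seq.foldl (fun count x => count ++ [neuralOneA x.toList]) []

-- ===== PORT B =====
-- reverse pass: z = current run of '0's to the right, add z at each '1'
def neuralGoB (cs : List Char) (z c : Int) : Int :=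
  match cs with
  | [] => c
  | ch :: rest =>
      if ch = '0' then neuralGoB rest (z + 1) c
      else if ch = '1' then neuralGoB rest 0 (c + z)
      else neuralGoB rest 0 c

def neural_alt (seq : List String) : List Int :=
  seq.foldl (fun out x => out ++ [neuralGoB x.toList.reverse 0 0]) []

-- ===== PRECONDITION & SPEC =====
def Spec_neural (seq : List String) (out : List Int) : Prop := out = neural_alt seq
instance (seq : List String) (out : List Int) : Decidable (Spec_neural seq out) := by unfold Spec_neural; infer_instance

-- ===== CLAIM (what is proved, stated in full; the proofs are below) =====
def Claim_equal_neural : Prop := ∀ (seq : List String), Dom_neural seq → Spec_neural seq (neural seq)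

-- ===== LEMMAS AND PROOFS =====

/-- length of the leading run of '0's -/
def zrun : List Char → Int
  | [] => 0
  | ch :: t => if ch = '0' then 1 + zrun t else 0

/-- reference value: sum over positions holding '1' of the zero run just after -/
def specN : List Char → Int
  | [] => 0
  | ch :: t => (if ch = '1' then zrun t else 0) + specN t

theorem zrun_replicate (z : Nat) : zrun (List.replicate z '0') = z := by
  induction z with
  | zero => rfl
  | succ n ih => simp [List.replicate_succ, zrun, ih]; omega

theorem specN_replicate (z : Nat) : specN (List.replicate z '0') = 0 := by
  induction z with
  | zero => rfl
  | succ n ih => simp [List.replicate_succ, specN, ih]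

theorem zrun_head_ne (w : List Char) (h : w.head? ≠ some '0') : zrun w = 0 := by
  cases w with
  | nil => rfl
  | cons d t => simp_all [zrun]

theorem zrun_append (y w : List Char) (h : w.head? ≠ some '0') :
    zrun (y ++ w) = zrun y := by
  induction y with
  | nil => simpa [zrun] using zrun_head_ne w h
  | cons c t ih => by_cases hc : c = '0' <;> simp [zrun, hc, ih]

theorem specN_append (y w : List Char) (h : w.head? ≠ some '0') :
    specN (y ++ w) = specN y + specN w := by
  induction y with
  | nil => simp [specN]
  | cons c t ih => simp [specN, ih, zrun_append t w h]; ring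

theorem neuralInnerA_acc (x : List Char) (js : List Int) (c : Int) :
    neuralInnerA x js c = c + neuralInnerA x js 0 := by
  induction js generalizing c with
  | nil => simp [neuralInnerA]
  | cons j rest ih =>
      by_cases h : PySem.List.pyGetD x j ' ' = '0'
      · rw [neuralInnerA, if_pos h, neuralInnerA, if_pos h, ih (c+1), ih (0+1)]; ring
      · rw [neuralInnerA, if_neg h, neuralInnerA, if_neg h]; ring

theorem neuralInnerA_drop (x : List Char) :
    ∀ (d j : Nat), j ≤ x.length → d = x.length - j →
      neuralInnerA x (PySem.List.pyRange (j : Int) (x.length : Int) 1) 0 = zrun (x.drop j) := by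
  intro d
  induction d with
  | zero =>
      intro j hj hd
      have hj' : j = x.length := by omega
      subst hj'
      rw [PySem.List.pyRange_one_eq_nil (by omega)]
      simp [neuralInnerA, zrun]
  | succ n ih =>
      intro j hj hd
      have hjlt : j < x.length := by omega
      rw [PySem.List.pyRange_one_cons (by exact_mod_cast hjlt)]
      have hdrop : x.drop j = x[j] :: x.drop (j + 1) := List.drop_eq_getElem_cons hjlt
      have hget : PySem.List.pyGetD x (j : Int) ' ' = x[j] := by
        simp [List.getD_eq_getElem?_getD, hjlt]
      have hcast : ((j : Int) + 1) = ((j + 1 : Nat) : Int) := by push_cast; ring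
      by_cases h0 : x[j] = '0'
      · rw [neuralInnerA, if_pos (by rw [hget]; exact h0), hcast,
          neuralInnerA_acc, ih (j+1) (by omega) (by omega), hdrop]
        simp [zrun, h0]
      · rw [neuralInnerA, if_neg (by rw [hget]; exact h0), hdrop]
        simp [zrun, h0]

theorem sum_range_specN (x : List Char) :
    ((List.range x.length).map
      (fun k => (if x.getD k ' ' = '1' then zrun (x.drop (k + 1)) else 0 : Int))).sum
      = specN x := by
  induction x with
  | nil => simp [specN]
  | cons c t ih =>
      rw [List.length_cons, List.range_succ_eq_map, List.map_cons, List.map_map, List.sum_cons]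
      have : ((List.range t.length).map
          ((fun k => (if (c :: t).getD k ' ' = '1' then zrun ((c :: t).drop (k + 1)) else 0 : Int)) ∘ Nat.succ)).sum
          = specN t := by
        rw [← ih]; congr 1
      rw [this]
      simp [specN]

theorem neuralOneA_eq_specN (x : List Char) : neuralOneA x = specN x := by
  have hcong := PySem.List.foldl_congr_mem (PySem.List.pyRange 0 (x.length : Int) 1)
    (fun c i =>
      if PySem.List.pyGetD x i ' ' = '1'
      then neuralInnerA x (PySem.List.pyRange (i + 1) (x.length : Int) 1) c
      else c)
    (fun c i => c + (if x.getD i.toNat ' ' = '1' then zrun (x.drop (i.toNat + 1)) else 0))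
    0
    (by
      intro acc i hi
      rw [PySem.List.mem_pyRange_one] at hi
      have hget : PySem.List.pyGetD x i ' ' = x.getD i.toNat ' ' := by
        have h0 : i = ((i.toNat : Nat) : Int) := by omega
        conv_lhs => rw [h0, PySem.List.pyGetD_natCast]
      simp only
      by_cases h1 : x.getD i.toNat ' ' = '1'
      · rw [if_pos (by rw [hget]; exact h1), if_pos h1]
        have hle : i.toNat + 1 ≤ x.length := by omega
        have hc : (i + 1) = (((i.toNat + 1 : Nat) : Int)) := by omega
        rw [hc, neuralInnerA_acc, neuralInnerA_drop x (x.length - (i.toNat + 1)) (i.toNat + 1) hle rfl]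
      · rw [if_neg (by rw [hget]; exact h1), if_neg h1, add_zero])
  unfold neuralOneA
  rw [hcong, PySem.List.foldl_add, PySem.List.pyRange_one, List.map_map]
  rw [← sum_range_specN x]
  simp only [sub_zero, Int.toNat_natCast, Function.comp_def, zero_add]

theorem neuralGoB_eq (cs : List Char) :
    ∀ (z : Nat) (c : Int), neuralGoB cs (z : Int) c
      = c + specN (cs.reverse ++ List.replicate z '0') := by
  induction cs with
  | nil => intro z c; simp [neuralGoB, specN_replicate]
  | cons ch rest ih =>
      intro z c
      by_cases h0 : ch = '0'
      · rw [neuralGoB, if_pos h0]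
        have : (z : Int) + 1 = ((z + 1 : Nat) : Int) := by push_cast; ring
        rw [this, ih (z+1) c]
        simp [h0, List.replicate_succ, List.append_assoc]
      · by_cases h1 : ch = '1'
        · rw [neuralGoB, if_neg h0, if_pos h1]
          have := ih 0 (c + z)
          simp only [Nat.cast_zero, List.replicate_zero, List.append_nil] at this
          rw [this]
          rw [List.reverse_cons, List.append_assoc, List.singleton_append,
            specN_append rest.reverse (ch :: List.replicate z '0') (by simp [h1])]
          simp [specN, h1, zrun_replicate, specN_replicate]
          ring
        · rw [neuralGoB, if_neg h0, if_neg h1]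
          have := ih 0 c
          simp only [Nat.cast_zero, List.replicate_zero, List.append_nil] at this
          rw [this]
          rw [List.reverse_cons, List.append_assoc, List.singleton_append,
            specN_append rest.reverse (ch :: List.replicate z '0') (by simp [h0])]
          simp [specN, h1, specN_replicate]

theorem one_eq (x : List Char) : neuralOneA x = neuralGoB x.reverse 0 0 := by
  have := neuralGoB_eq x.reverse 0 0
  simp only [Nat.cast_zero, List.replicate_zero, List.append_nil, List.reverse_reverse,
    zero_add] at this
  rw [this, neuralOneA_eq_specN]

-- ===== VERDICT (by name: the statement is the Claim_ definition above) =====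
theorem neural_spec : Claim_equal_neural := by
  intro seq _
  unfold Spec_neural neural neural_alt
  rw [PySem.List.foldl_append_singleton_eq_map, PySem.List.foldl_append_singleton_eq_map]
  simp only [List.nil_append]
  exact List.map_congr_left (fun x _ => one_eq x.toList)
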